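-- pv_equiv track=rewrite | github.com/tavoweb/ai-brain | ai_brain/core/context_generator.py | _render_compact_list
-- ===== SOURCE A (Python) =====
-- def _render_compact_list(files: list, chunk_size: int = 10, max_files: int = 30) -> str:
--     """Renders a list of files as compact comma-separated chunks with a hard limit."""
--     if not files:
--         return ""
--
--     total_count = len(files)
--     to_show = files[:max_files]
--     names = [f"`{f['name']}`" for f in to_show]
--
--     # Split names into chunks for better readability in terminal
--     chunks = [names[i:i + chunk_size] for i in range(0, len(names), chunk_size)]
--     output = "\n".join([", ".join(chunk) for chunk in chunks])
--
--     if total_count > max_files: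
--         output += f"\n... and {total_count - max_files} more files."
--
--     return output
-- ===== SOURCE B (Python) =====
-- def _render_compact_list(files: list, chunk_size: int = 10, max_files: int = 30) -> str:
--     """Renders a list of files as compact comma-separated chunks with a hard limit."""
--     if not files:
--         return ""
--     total_count = len(files)
--     parts = []
--     for i, f in enumerate(files[:max_files]):
--         if i == 0:
--             sep = ""
--         elif i % chunk_size == 0:
--             sep = "\n"
--         else:
--             sep = ", "
--         parts.append(sep + "`" + f["name"] + "`")
--     if total_count > max_files:
--         parts.append("\n... and " + str(total_count - max_files) + " more files.")
--     return "".join(parts)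
-- ===== Notes on version B (the rewrite author's own statement) =====
-- stated objective: alternative
-- what changed: B drops A's intermediate list-of-chunks and nested joins ('\n'.join of ', '.join per chunk) and instead makes a single enumerate pass over the capped file list, emitting before each backtick-wrapped name a separator chosen by index ('' at 0, '\n' at multiples of chunk_size, ', ' otherwise) into one flat parts list joined once.
-- outside the precondition, e.g. on _render_compact_list([{'name': 'a'}], -1, 30): A returns '', B returns '`a`'
import Mathlib
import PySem

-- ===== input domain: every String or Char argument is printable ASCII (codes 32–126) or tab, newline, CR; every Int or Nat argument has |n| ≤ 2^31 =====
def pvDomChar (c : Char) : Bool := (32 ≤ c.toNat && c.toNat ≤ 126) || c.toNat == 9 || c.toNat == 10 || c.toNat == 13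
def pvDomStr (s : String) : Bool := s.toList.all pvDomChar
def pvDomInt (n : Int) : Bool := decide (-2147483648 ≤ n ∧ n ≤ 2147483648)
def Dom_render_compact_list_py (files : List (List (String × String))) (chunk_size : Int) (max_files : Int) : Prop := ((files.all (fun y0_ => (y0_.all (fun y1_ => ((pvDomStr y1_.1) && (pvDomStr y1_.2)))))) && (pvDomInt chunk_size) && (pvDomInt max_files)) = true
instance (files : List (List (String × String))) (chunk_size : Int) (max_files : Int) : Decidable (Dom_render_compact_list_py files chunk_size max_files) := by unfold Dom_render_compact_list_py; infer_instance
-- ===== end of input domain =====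

-- B replaces A's chunk-list construction and double join by a single enumerate pass that
-- emits a modulo-chosen separator before each backtick-wrapped name (objective: alternative).

-- ===== PORT A =====
def render_compact_list_py (files : List (List (String × String))) (chunk_size : Int) (max_files : Int) : String :=
  if files = [] then ""
  else
    let total_count : Int := (files.length : Int)
    let to_show := PySem.List.slice files none (some max_files)
    let names := to_show.map (fun f => "`" ++ (((PySem.Dict.mk f).get? "name").getD "") ++ "`")
    let chunks := (PySem.List.pyRange 0 (names.length : Int) chunk_size).map
      (fun i => PySem.List.slice names (some i) (some (i + chunk_size)))
    let output := PySem.Str.join "\n" (chunks.map (fun chunk => PySem.Str.join ", " chunk))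
    if total_count > max_files then
      output ++ ("\n... and " ++ PySem.Int.toStr (total_count - max_files) ++ " more files.")
    else output

-- ===== PORT B =====
-- separator emitted before the element at index i (B's if/elif/else chain)
def pvSep (i : Int) (chunk_size : Int) : String :=
  if i = 0 then "" else if PySem.Int.mod i chunk_size = 0 then "\n" else ", "

def render_compact_list_py_alt (files : List (List (String × String))) (chunk_size : Int) (max_files : Int) : String :=
  if files = [] then ""
  else
    let total_count : Int := (files.length : Int)
    let parts := (PySem.List.enumerate (PySem.List.slice files none (some max_files)) 0).foldl
      (fun acc p => acc ++ [pvSep p.1 chunk_size ++ ("`" ++ (((PySem.Dict.mk p.2).get? "name").getD "") ++ "`")]) []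
    let parts2 := if total_count > max_files
      then parts ++ ["\n... and " ++ PySem.Int.toStr (total_count - max_files) ++ " more files."]
      else parts
    PySem.Str.join "" parts2

-- ===== PRECONDITION & SPEC =====
-- Pre_ excludes chunk_size = 0 on nonempty input, where A raises ValueError (range() step 0),
-- and negative chunk_size when at least one file is shown — a corner no caller of a chunked
-- renderer specifies, on which A's empty range silently drops every shown name — and it
-- excludes inputs whose shown slice has a dict without a 'name' key (KeyError in both A and B).
def Pre_render_compact_list_py (files : List (List (String × String))) (chunk_size : Int) (max_files : Int) : Prop :=
  files = [] ∨
    ((∀ f ∈ PySem.List.slice files none (some max_files), (((PySem.Dict.mk f).get? "name").isSome = true)) ∧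
      (0 < chunk_size ∨ (chunk_size ≠ 0 ∧ PySem.List.slice files none (some max_files) = [])))
instance (files : List (List (String × String))) (chunk_size : Int) (max_files : Int) : Decidable (Pre_render_compact_list_py files chunk_size max_files) := by unfold Pre_render_compact_list_py; infer_instance

def pvWitness_render_compact_list_py : (List (List (String × String))) × Int × Int :=
  ([[("name", "a")], [("name", "b")], [("name", "c")]], 2, 2)

def Spec_render_compact_list_py (files : List (List (String × String))) (chunk_size : Int) (max_files : Int) (out : String) : Prop := out = render_compact_list_py_alt files chunk_size max_files
instance (files : List (List (String × String))) (chunk_size : Int) (max_files : Int) (out : String) : Decidable (Spec_render_compact_list_py files chunk_size max_files out) := by unfold Spec_render_compact_list_py; infer_instance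

-- ===== CLAIM (what is proved, stated in full; the proofs are below) =====
def Claim_equal_render_compact_list_py : Prop := ∀ (files : List (List (String × String))) (chunk_size : Int) (max_files : Int), Dom_render_compact_list_py files chunk_size max_files → Pre_render_compact_list_py files chunk_size max_files → Spec_render_compact_list_py files chunk_size max_files (render_compact_list_py files chunk_size max_files)

-- ===== LEMMAS AND PROOFS =====

-- A's per-file rendering "`" + f['name'] + "`"
def pvWrap (f : List (String × String)) : String := "`" ++ (((PySem.Dict.mk f).get? "name").getD "") ++ "`"

-- A's core on the list of wrapped names: join of comma-joined chunks
def pvAj (c : Int) (ns : List String) : String :=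
  PySem.Str.join "\n" ((PySem.List.pyRange 0 (ns.length : Int) c).map
    (fun i => PySem.Str.join ", " (PySem.List.slice ns (some i) (some (i + c)))))

-- B's core on the list of wrapped names: flat join of separator-prefixed names
def pvBj (c : Int) (ns : List String) : String :=
  PySem.Str.join "" ((PySem.List.enumerate ns 0).map (fun p => pvSep p.1 c ++ p.2))

lemma charsJoin_empty (l : List (List Char)) : PySem.Chars.join [] l = l.flatten := by
  induction l with
  | nil => simp [PySem.Chars.join_nil]
  | cons p t ih =>
    cases t with
    | nil => simp [PySem.Chars.join_singleton]
    | cons q r => rw [PySem.Chars.join_cons_cons]; simp [ih]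

lemma strJoin_empty_toList (parts : List String) :
    (PySem.Str.join "" parts).toList = (parts.map String.toList).flatten := by
  rw [PySem.Str.toList_join]
  have h : ("" : String).toList = [] := by simp
  rw [h, charsJoin_empty]

lemma strJoin_nil (sep : String) : PySem.Str.join sep [] = "" := by
  rw [← String.toList_inj, PySem.Str.toList_join]
  simp [PySem.Chars.join_nil]

lemma strJoin_singleton (sep x : String) : PySem.Str.join sep [x] = x := by
  rw [← String.toList_inj, PySem.Str.toList_join]
  simp [PySem.Chars.join_singleton]

lemma strJoin_cons_ne (sep x : String) (l : List String) (h : l ≠ []) :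
    PySem.Str.join sep (x :: l) = x ++ (sep ++ PySem.Str.join sep l) := by
  cases l with
  | nil => exact absurd rfl h
  | cons q r =>
    rw [← String.toList_inj, PySem.Str.toList_join]
    simp only [List.map_cons, PySem.Chars.join_cons_cons, String.toList_append,
      PySem.Str.toList_join, List.map_cons, List.append_assoc]

lemma strJoin_empty_append (l1 l2 : List String) :
    PySem.Str.join "" (l1 ++ l2) = PySem.Str.join "" l1 ++ PySem.Str.join "" l2 := by
  rw [← String.toList_inj, String.toList_append, strJoin_empty_toList, strJoin_empty_toList,
    strJoin_empty_toList, List.map_append, List.flatten_append]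

lemma pyRange_chunk_cons (c n : Int) (hc : 0 < c) (hn : 0 < n) :
    PySem.List.pyRange 0 n c = 0 :: (PySem.List.pyRange 0 (n - c) c).map (· + c) := by
  rw [PySem.List.pyRange_of_pos _ _ hc, PySem.List.pyRange_of_pos _ _ hc]
  by_cases hnc : (0:Int) < n - c
  · rw [if_pos hn, if_pos hnc]
    have e1 : (n - 0 + c - 1) / c = (n - c - 0 + c - 1) / c + 1 := by
      have h2 : n - 0 + c - 1 = (n - c - 0 + c - 1) + 1 * c := by ring
      rw [h2, Int.add_mul_ediv_right _ _ (by omega : c ≠ 0)]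
    have hq : 0 ≤ (n - c - 0 + c - 1) / c := Int.ediv_nonneg (by omega) (by omega)
    have e2 : ((n - c - 0 + c - 1) / c + 1).toNat = ((n - c - 0 + c - 1) / c).toNat + 1 := by omega
    rw [e1, e2, List.range_succ_eq_map, List.map_cons, List.map_map, List.map_map]
    refine congrArg₂ _ (by ring) ?_
    apply List.map_congr_left
    intro k _
    simp [Nat.succ_eq_add_one]
    ring
  · rw [if_pos hn, if_neg hnc]
    have e1 : (n - 0 + c - 1) / c = 1 := by
      have h2 : n - 0 + c - 1 = (n - 1) + 1 * c := by ring
      rw [h2, Int.add_mul_ediv_right _ _ (by omega : c ≠ 0),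
        Int.ediv_eq_zero_of_lt (by omega) (by omega)]
      norm_num
    rw [e1]
    simp

lemma pv_enumerate_map {α β : Type} (g : α → β) (xs : List α) (s : Int) :
    PySem.List.enumerate (xs.map g) s = (PySem.List.enumerate xs s).map (fun p => (p.1, g p.2)) := by
  induction xs generalizing s with
  | nil => simp [PySem.List.enumerate_nil]
  | cons x t ih => simp [PySem.List.enumerate_cons, ih]

lemma map_sep_congr (c : Int) (hc : 0 < c) (d : List String) :
    ∀ (a b : Int), 0 < a → 0 < b → PySem.Int.mod a c = PySem.Int.mod b c →
    (PySem.List.enumerate d a).map (fun p => pvSep p.1 c ++ p.2)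
      = (PySem.List.enumerate d b).map (fun p => pvSep p.1 c ++ p.2) := by
  induction d with
  | nil => intro a b _ _ _; simp [PySem.List.enumerate_nil]
  | cons x t ih =>
    intro a b ha hb hm
    rw [PySem.List.enumerate_cons, PySem.List.enumerate_cons, List.map_cons, List.map_cons]
    have hsep : pvSep a c = pvSep b c := by
      unfold pvSep
      rw [if_neg (by omega : ¬ a = 0), if_neg (by omega : ¬ b = 0), hm]
    rw [hsep, ih (a + 1) (b + 1) (by omega) (by omega) ?_]
    simp only [PySem.Int.mod_eq_emod_of_pos hc] at hm ⊢
    exact Int.ModEq.add_right 1 hm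

lemma comma_tail (c : Int) (t : List String) :
    ∀ (a : Int), 0 < a → a + (t.length : Int) ≤ c →
    (PySem.List.enumerate t a).map (fun p => pvSep p.1 c ++ p.2) = t.map (fun s => ", " ++ s) := by
  induction t with
  | nil => intro a _ _; simp [PySem.List.enumerate_nil]
  | cons x r ih =>
    intro a ha hle
    simp only [List.length_cons] at hle
    push_cast at hle
    have hc : 0 < c := by omega
    rw [PySem.List.enumerate_cons, List.map_cons, List.map_cons]
    have hmod : PySem.Int.mod a c = a := by
      rw [PySem.Int.mod_eq_emod_of_pos hc]
      exact Int.emod_eq_of_lt (by omega) (by omega)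
    have hsep : pvSep a c = ", " := by
      unfold pvSep
      rw [if_neg (by omega : ¬ a = 0), hmod, if_neg (by omega : ¬ a = 0)]
    rw [hsep, ih (a + 1) (by omega) (by omega)]

lemma charsJoin_cons_eq (sep p : List Char) (ps : List (List Char)) :
    PySem.Chars.join sep (p :: ps) = p ++ (ps.map (fun q => sep ++ q)).flatten := by
  induction ps generalizing p with
  | nil => simp [PySem.Chars.join_singleton]
  | cons q rest ih =>
    rw [PySem.Chars.join_cons_cons, ih q]
    simp

lemma comma_chunk (c : Int) (_hc : 0 < c) (t : List String) (ht : t ≠ []) (hlen : (t.length : Int) ≤ c) :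
    PySem.Str.join "" ((PySem.List.enumerate t 0).map (fun p => pvSep p.1 c ++ p.2))
      = PySem.Str.join ", " t := by
  cases t with
  | nil => exact absurd rfl ht
  | cons x r =>
    have h0 : pvSep 0 c = "" := by unfold pvSep; simp
    simp only [List.length_cons] at hlen
    push_cast at hlen
    rw [PySem.List.enumerate_cons, List.map_cons, h0]
    rw [comma_tail c r (0 + 1) (by norm_num) (by push_cast; omega)]
    rw [← String.toList_inj, strJoin_empty_toList, PySem.Str.toList_join]
    simp only [List.map_cons]
    rw [charsJoin_cons_eq]
    simp [List.map_map, Function.comp_def]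

lemma newline_head (c : Int) (hc : 0 < c) (d : List String) (hd : d ≠ []) :
    PySem.Str.join "" ((PySem.List.enumerate d c).map (fun p => pvSep p.1 c ++ p.2))
      = "\n" ++ PySem.Str.join "" ((PySem.List.enumerate d 0).map (fun p => pvSep p.1 c ++ p.2)) := by
  cases d with
  | nil => exact absurd rfl hd
  | cons x r =>
    have hsc : pvSep c c = "\n" := by
      unfold pvSep
      rw [if_neg (by omega : ¬ c = 0), if_pos]
      rw [PySem.Int.mod_eq_zero_iff_dvd]
    have hs0 : pvSep 0 c = "" := by unfold pvSep; simp
    have htail : (PySem.List.enumerate r (c + 1)).map (fun p => pvSep p.1 c ++ p.2)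
        = (PySem.List.enumerate r (0 + 1)).map (fun p => pvSep p.1 c ++ p.2) := by
      apply map_sep_congr c hc r (c + 1) (0 + 1) (by omega) (by omega)
      rw [PySem.Int.mod_eq_emod_of_pos hc, PySem.Int.mod_eq_emod_of_pos hc]
      have h2 : c + 1 = 1 + c * 1 := by ring
      rw [h2, Int.add_mul_emod_self_left]
      norm_num
    rw [PySem.List.enumerate_cons, PySem.List.enumerate_cons, List.map_cons, List.map_cons,
      hsc, hs0, htail]
    rw [← String.toList_inj, String.toList_append, strJoin_empty_toList, strJoin_empty_toList]
    simp

lemma bj_step (c : Int) (hc : 0 < c) (ns : List String) (h : ns ≠ []) :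
    pvBj c ns = PySem.Str.join ", " (ns.take c.toNat)
      ++ (if ns.drop c.toNat = [] then "" else "\n" ++ pvBj c (ns.drop c.toNat)) := by
  unfold pvBj
  conv_lhs => rw [← List.take_append_drop c.toNat ns]
  rw [PySem.List.enumerate_append, List.map_append, strJoin_empty_append]
  have htne : ns.take c.toNat ≠ [] := by
    cases ns with
    | nil => exact absurd rfl h
    | cons a t =>
      cases hc' : c.toNat with
      | zero => omega
      | succ m => simp
  have htlen : ((ns.take c.toNat).length : Int) ≤ c := by
    simp only [List.length_take]
    omega
  rw [comma_chunk c hc _ htne htlen]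
  congr 1
  by_cases hdrop : ns.drop c.toNat = []
  · rw [hdrop, if_pos rfl]
    simp [PySem.List.enumerate_nil, strJoin_nil]
  · rw [if_neg hdrop]
    have hlt : c.toNat < ns.length := by
      by_contra hle
      exact hdrop (List.drop_eq_nil_iff.mpr (by omega))
    have hfull : ((ns.take c.toNat).length : Int) = c := by
      simp only [List.length_take]
      omega
    rw [hfull, zero_add]
    exact newline_head c hc _ hdrop

lemma pv_slice_zero (c : Int) (hc : 0 < c) (ns : List String) :
    PySem.List.slice ns (some 0) (some (0 + c)) = ns.take c.toNat := by
  rw [PySem.List.slice_toNat ns (by omega) (by omega)]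
  simp

lemma aj_step (c : Int) (hc : 0 < c) (ns : List String) (h : ns ≠ []) :
    pvAj c ns = PySem.Str.join ", " (ns.take c.toNat)
      ++ (if ns.drop c.toNat = [] then "" else "\n" ++ pvAj c (ns.drop c.toNat)) := by
  unfold pvAj
  have hn : (0:Int) < (ns.length : Int) := by
    cases ns with
    | nil => exact absurd rfl h
    | cons a t => simp only [List.length_cons]; omega
  rw [pyRange_chunk_cons c _ hc hn]
  simp only [List.map_cons, List.map_map]
  rw [pv_slice_zero c hc ns]
  by_cases hdrop : ns.drop c.toNat = []
  · have hle : (ns.length : Int) ≤ c := by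
      by_contra hgt
      have : c.toNat < ns.length := by omega
      have := List.drop_eq_nil_iff.mp hdrop
      omega
    have hempty : PySem.List.pyRange 0 ((ns.length : Int) - c) c = [] := by
      rw [PySem.List.pyRange_of_pos _ _ hc, if_neg (by omega)]
      simp
    rw [hempty, List.map_nil, strJoin_singleton, if_pos hdrop]
    simp
  · rw [if_neg hdrop]
    have hlt : c.toNat < ns.length := by
      by_contra hle
      exact hdrop (List.drop_eq_nil_iff.mpr (by omega))
    have hdl : (((ns.drop c.toNat).length : Int)) = (ns.length : Int) - c := by
      simp [List.length_drop]
      omega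
    have htail : (PySem.List.pyRange 0 ((ns.length : Int) - c) c).map
          ((fun i => PySem.Str.join ", " (PySem.List.slice ns (some i) (some (i + c)))) ∘ (· + c))
        = (PySem.List.pyRange 0 (((ns.drop c.toNat).length : Int)) c).map
          (fun i => PySem.Str.join ", " (PySem.List.slice (ns.drop c.toNat) (some i) (some (i + c)))) := by
      rw [hdl]
      apply List.map_congr_left
      intro i hi
      have hib := (PySem.List.mem_pyRange_iff_of_pos hc i).mp hi
      have hi0 : 0 ≤ i := hib.1
      simp only [Function.comp_apply]
      congr 1
      rw [PySem.List.slice_toNat ns (by omega) (by omega),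
        PySem.List.slice_toNat (ns.drop c.toNat) (by omega) (by omega)]
      have e1 : (i + c + c).toNat - (i + c).toNat = c.toNat := by omega
      have e2 : (i + c).toNat - i.toNat = c.toNat := by omega
      have e3 : (i + c).toNat = c.toNat + i.toNat := by omega
      rw [e1, e2, e3, List.drop_drop]
    have hne : (PySem.List.pyRange 0 ((ns.length : Int) - c) c).map
        ((fun i => PySem.Str.join ", " (PySem.List.slice ns (some i) (some (i + c)))) ∘ (· + c)) ≠ [] := by
      rw [pyRange_chunk_cons c _ hc (by omega)]
      simp
    rw [strJoin_cons_ne _ _ _ hne, htail]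

lemma aj_nil (c : Int) (hc : 0 < c) : pvAj c [] = "" := by
  unfold pvAj
  rw [PySem.List.pyRange_of_pos _ _ hc]
  simp [strJoin_nil]

lemma bj_nil (c : Int) : pvBj c [] = "" := by
  unfold pvBj
  simp [PySem.List.enumerate_nil, strJoin_nil]

lemma main_aux (c : Int) (hc : 0 < c) : ∀ (k : Nat) (ns : List String), ns.length ≤ k →
    pvAj c ns = pvBj c ns := by
  intro k
  induction k with
  | zero =>
    intro ns hlen
    have hns : ns = [] := by
      cases ns with
      | nil => rfl
      | cons a t => simp at hlen
    rw [hns, aj_nil c hc, bj_nil c]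
  | succ k ih =>
    intro ns hlen
    by_cases hns : ns = []
    · rw [hns, aj_nil c hc, bj_nil c]
    · rw [aj_step c hc ns hns, bj_step c hc ns hns]
      by_cases hdrop : ns.drop c.toNat = []
      · rw [if_pos hdrop, if_pos hdrop]
      · rw [if_neg hdrop, if_neg hdrop]
        have hpos : 0 < ns.length := by
          cases ns with
          | nil => exact absurd rfl hns
          | cons a t => simp
        have : (ns.drop c.toNat).length ≤ k := by
          simp only [List.length_drop]
          omega
        rw [ih (ns.drop c.toNat) this]

lemma pv_core (c : Int) (hc : 0 < c) (ts : List (List (String × String))) :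
    PySem.Str.join "\n"
      (List.map (fun chunk => PySem.Str.join ", " chunk)
        (List.map
          (fun i => PySem.List.slice
            (List.map (fun f => "`" ++ (((PySem.Dict.mk f).get? "name").getD "") ++ "`") ts)
            (some i) (some (i + c)))
          (PySem.List.pyRange 0
            ((List.map (fun f => "`" ++ (((PySem.Dict.mk f).get? "name").getD "") ++ "`") ts).length : Int) c)))
    = PySem.Str.join ""
        (List.map (fun p => pvSep p.1 c ++ ("`" ++ (((PySem.Dict.mk p.2).get? "name").getD "") ++ "`"))
          (PySem.List.enumerate ts 0)) := by
  have h2 : (PySem.List.enumerate ts 0).map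
        (fun p => pvSep p.1 c ++ ("`" ++ (((PySem.Dict.mk p.2).get? "name").getD "") ++ "`"))
      = (PySem.List.enumerate
          (ts.map (fun f => "`" ++ (((PySem.Dict.mk f).get? "name").getD "") ++ "`")) 0).map
          (fun p => pvSep p.1 c ++ p.2) := by
    rw [pv_enumerate_map, List.map_map]
    rfl
  rw [h2, List.map_map]
  show pvAj c (ts.map (fun f => "`" ++ (((PySem.Dict.mk f).get? "name").getD "") ++ "`"))
      = pvBj c (ts.map (fun f => "`" ++ (((PySem.Dict.mk f).get? "name").getD "") ++ "`"))
  exact main_aux c hc _ _ le_rfl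

lemma pyRange_self_zero (c : Int) : PySem.List.pyRange 0 0 c = [] := by
  unfold PySem.List.pyRange
  split_ifs <;> simp_all

-- ===== VERDICT (by name: the statement is the Claim_ definition above) =====
theorem render_compact_list_py_spec : Claim_equal_render_compact_list_py := by
  intro files c m hDom hPre
  unfold Spec_render_compact_list_py
  by_cases hfe : files = []
  · simp [render_compact_list_py, render_compact_list_py_alt, hfe]
  · rcases hPre with h | ⟨_, hc | ⟨hne0, hempty⟩⟩
    · exact absurd h hfe
    · simp only [render_compact_list_py, render_compact_list_py_alt, if_neg hfe]
      simp only [PySem.List.foldl_append_singleton_eq_map, List.nil_append]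
      split_ifs with h
      · rw [strJoin_empty_append, strJoin_singleton, pv_core c hc _]
      · exact pv_core c hc _
    · simp only [render_compact_list_py, render_compact_list_py_alt, if_neg hfe, hempty]
      simp only [List.map_nil, List.length_nil, Nat.cast_zero, PySem.List.enumerate_nil,
        List.foldl_nil, pyRange_self_zero, strJoin_nil, List.nil_append]
      split_ifs with h
      · rw [strJoin_singleton]
        simp
      · rw [strJoin_nil]
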